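-- pv_equiv track=rewrite | github.com/aprilrian/Programming-Fundamentals | 8/daspro08_24060121120022_Aprilyanto Setiyawan Siburian.py | insertAfter
-- ===== SOURCE A (Python) =====
-- def IsEmpty(L):
--     return L == []
--
-- def FirstElmt(T):
--     if not IsEmpty(T):
--         return T[0]
--     else:
--         return []
--
-- def Tail(T):
--     if not IsEmpty(T):
--         return T[1:]
--     else:
--         return []
--
-- def insertAfter(L, x, e):
--     if IsEmpty(L) == True:
--         return []
--     else:
--         if FirstElmt(L) == e:
--             return [FirstElmt(L)] + [x] + insertAfter(Tail(L), x, e)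
--         else:
--             return [FirstElmt(L)] + insertAfter(Tail(L), x, e)
-- ===== SOURCE B (Python) =====
-- def insertAfter(L, x, e):
--     out = []
--     for a in L:
--         out.append(a)
--         if a == e:
--             out.append(x)
--     return out
-- ===== Notes on version B (the rewrite author's own statement) =====
-- stated objective: faster
-- what changed: Replaced the recursive head/tail-slicing rebuild (each Tail copies the list, each step concatenates fresh lists) by a single iterative pass that appends each element and x after matches.
import Mathlib
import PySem

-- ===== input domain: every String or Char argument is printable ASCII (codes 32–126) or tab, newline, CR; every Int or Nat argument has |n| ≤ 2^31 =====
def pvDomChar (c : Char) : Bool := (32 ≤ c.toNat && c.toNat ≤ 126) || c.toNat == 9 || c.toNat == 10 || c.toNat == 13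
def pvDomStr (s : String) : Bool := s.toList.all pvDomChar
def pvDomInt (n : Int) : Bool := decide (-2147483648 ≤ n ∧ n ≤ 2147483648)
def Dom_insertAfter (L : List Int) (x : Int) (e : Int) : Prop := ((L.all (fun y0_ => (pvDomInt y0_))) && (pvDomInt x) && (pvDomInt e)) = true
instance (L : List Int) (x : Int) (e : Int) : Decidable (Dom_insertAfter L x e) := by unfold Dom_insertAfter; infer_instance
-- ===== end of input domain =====

-- B replaces A's quadratic recursive head/tail-slicing rebuild with a single O(n) iterative pass (faster, asymptotic).


-- ===== PORT A =====
def pyIsEmpty (L : List Int) : Bool := L == []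

-- Python's FirstElmt returns [] on an empty list; A only calls it on nonempty lists, so a default 0 stands for that unreachable branch.
def pyFirstElmt (T : List Int) : Int :=
  if !(pyIsEmpty T) then (PySem.List.pyGet? T 0).getD 0 else 0

def pyTail (T : List Int) : List Int :=
  if !(pyIsEmpty T) then PySem.List.slice T (some 1) none else []

def insertAfter (L : List Int) (x : Int) (e : Int) : List Int :=
  if pyIsEmpty L = true then []
  else
    if pyFirstElmt L == e then
      [pyFirstElmt L] ++ [x] ++ insertAfter (pyTail L) x e
    else
      [pyFirstElmt L] ++ insertAfter (pyTail L) x e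
termination_by L.length
decreasing_by
  all_goals
    simp_all [pyTail, pyIsEmpty, PySem.List.slice_from_one]
    cases L <;> simp_all

-- ===== PORT B =====
def insertAfter_alt (L : List Int) (x : Int) (e : Int) : List Int :=
  L.foldl (fun out a =>
    let out := out ++ [a]
    if a == e then out ++ [x] else out) []

-- ===== PRECONDITION & SPEC =====
def Spec_insertAfter (L : List Int) (x : Int) (e : Int) (out : List Int) : Prop := out = insertAfter_alt L x e
instance (L : List Int) (x : Int) (e : Int) (out : List Int) : Decidable (Spec_insertAfter L x e out) := by unfold Spec_insertAfter; infer_instance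

-- ===== CLAIM (what is proved, stated in full; the proofs are below) =====
def Claim_equal_insertAfter : Prop := ∀ (L : List Int) (x : Int) (e : Int), Dom_insertAfter L x e → Spec_insertAfter L x e (insertAfter L x e)

-- ===== LEMMAS AND PROOFS =====
theorem alt_foldl_acc (L : List Int) (x e : Int) (acc : List Int) :
    L.foldl (fun out a => let out := out ++ [a]; if a == e then out ++ [x] else out) acc
      = acc ++ insertAfter_alt L x e := by
  induction L generalizing acc with
  | nil => simp [insertAfter_alt]
  | cons a t ih =>
    simp only [insertAfter_alt, List.foldl_cons]
    rw [ih, ih (acc := if a == e then [] ++ [a] ++ [x] else [] ++ [a])]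
    split <;> simp

theorem insertAfter_eq_alt (L : List Int) (x e : Int) :
    insertAfter L x e = insertAfter_alt L x e := by
  induction L with
  | nil => simp [insertAfter, insertAfter_alt, pyIsEmpty]
  | cons a t ih =>
    rw [insertAfter]
    have ht : pyTail (a :: t) = t := by
      simp [pyTail, pyIsEmpty, PySem.List.slice_from_one]
    have hf : pyFirstElmt (a :: t) = a := by
      simp [pyFirstElmt, pyIsEmpty, PySem.List.pyGet?, PySem.List.pyIdx?]
    simp only [pyIsEmpty, ht, hf, ih]
    conv_rhs => rw [insertAfter_alt, List.foldl_cons, alt_foldl_acc]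
    split <;> simp_all <;> split <;> simp_all

-- ===== VERDICT (by name: the statement is the Claim_ definition above) =====
theorem insertAfter_spec : Claim_equal_insertAfter := by
  intro L x e _
  exact insertAfter_eq_alt L x e
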